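-- pv_equiv track=rewrite | github.com/sefinehtesfa34/competetive_programming- | data_bricks_sample.py | solution
-- ===== SOURCE A (Python) =====
-- def solution(s):
--     def checker(left, right):
--         while left < right:
--             if s[left] != s[right]:
--                 return False
--             left += 1
--             right -= 1
--         return True
--     def dfs(left, right):
--         if left == right:
--             return s[left]
--         if left > right:
--             return ''
--
--         for index in range(right, left, -1):
--             is_palindrome = checker(left, index)
--             if is_palindrome:
--                 return dfs(index + 1, right)
--         return s[left:right + 1]
--     result = dfs(0, len(s) - 1)
--     return result if result else ""
-- ===== SOURCE B (Python) =====
-- def solution(s):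
--     t = s
--     while len(t) >= 2:
--         for L in range(len(t), 1, -1):
--             if t[L - 1] == t[0] and t[:L] == t[:L][::-1]:
--                 break
--         else:
--             return t
--         t = t[L:]
--     return t
-- ===== Notes on version B (the rewrite author's own statement) =====
-- stated objective: simpler
-- what changed: A's recursive dfs over index pairs with a hand-written two-pointer character-comparison checker is replaced by a plain iterative loop that keeps only the remaining suffix and tests each candidate prefix by comparing it with its reversal (p == p[::-1]) behind a first-vs-last-character pre-check.
import Mathlib
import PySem

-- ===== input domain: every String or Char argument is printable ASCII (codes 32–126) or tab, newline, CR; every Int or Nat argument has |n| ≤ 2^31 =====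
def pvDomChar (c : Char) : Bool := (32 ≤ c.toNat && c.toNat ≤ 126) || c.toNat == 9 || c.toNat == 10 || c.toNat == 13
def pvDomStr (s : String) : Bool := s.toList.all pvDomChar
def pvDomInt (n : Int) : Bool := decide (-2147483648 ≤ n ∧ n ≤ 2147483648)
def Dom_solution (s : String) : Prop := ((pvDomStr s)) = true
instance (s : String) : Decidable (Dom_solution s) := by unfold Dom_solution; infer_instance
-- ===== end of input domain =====

-- B replaces A's recursive dfs + two-pointer checker by a plain iterative strip loop that
-- tests each candidate prefix by comparing it with its reversal (objective: simpler).

-- ===== PORT A =====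
-- checker(left, right): two-pointer palindrome test on s[left..right]
def pvChecker (cs : List Char) (left right : Int) : Bool :=
  if left < right then
    match PySem.List.pyGet? cs left, PySem.List.pyGet? cs right with
    | some a, some b => if a ≠ b then false else pvChecker cs (left + 1) (right - 1)
    | _, _ => false   -- IndexError; unreachable for the indices dfs passes
  else true
termination_by (right - left).toNat
decreasing_by omega

-- the 'for index in range(right, left, -1)' scan: first index with checker(left, index),
-- at which the loop body returns (so scanning to the first hit is the loop itself)
def pvScan (cs : List Char) (left index : Int) : Option Int :=
  if index > left then
    if pvChecker cs left index then some index
    else pvScan cs left (index - 1)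
  else none
termination_by (index - left).toNat
decreasing_by omega

-- needed by pvDfs's termination argument, so it sits above pvDfs
theorem pvScan_some_gt (cs : List Char) (left index j : Int)
    (h : pvScan cs left index = some j) : left < j := by
  induction index using pvScan.induct cs left with
  | case1 i hgt hc =>
    rw [pvScan, if_pos hgt, if_pos hc] at h
    injection h with h2
    omega
  | case2 i hgt hc ih =>
    rw [pvScan, if_pos hgt, if_neg hc] at h
    exact ih h
  | case3 i hle =>
    rw [pvScan, if_neg hle] at h
    exact absurd h (by simp)

def pvDfs (cs : List Char) (left right : Int) : List Char :=
  if left = right then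
    match PySem.List.pyGet? cs left with
    | some c => [c]
    | none => []      -- IndexError; unreachable for the indices solution passes
  else if left > right then []
  else
    match h : pvScan cs left right with
    | some idx => pvDfs cs (idx + 1) right
    | none => PySem.List.slice cs (some left) (some (right + 1))
termination_by (right - left + 1).toNat
decreasing_by have := pvScan_some_gt cs left right idx h; omega

def solution (s : String) : String :=
  let cs := s.toList
  String.mk (pvDfs cs 0 ((cs.length : Int) - 1))

-- ===== PORT B =====
-- the 'for L in range(len(t), 1, -1)' scan with its break/else: first L with t[:L] a palindrome
def pvFind (t : List Char) (L : Nat) : Option Nat :=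
  if 2 ≤ L then
    if t.getD (L - 1) ' ' = t.getD 0 ' ' ∧ t.take L = (t.take L).reverse then some L
    else pvFind t (L - 1)
  else none

-- needed by pvStrip's termination argument, so it sits above pvStrip
theorem pvFind_some_ge2 (t : List Char) (L L' : Nat)
    (h : pvFind t L = some L') : 2 ≤ L' := by
  induction L using pvFind.induct t with
  | case1 L hge hp =>
    rw [pvFind, if_pos hge, if_pos hp] at h
    injection h with h2
    omega
  | case2 L hge hp ih =>
    rw [pvFind, if_pos hge, if_neg hp] at h
    exact ih h
  | case3 L hlt =>
    rw [pvFind, if_neg hlt] at h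
    exact absurd h (by simp)

def pvStrip (t : List Char) : List Char :=
  if t.length < 2 then t
  else
    match h : pvFind t t.length with
    | some L => pvStrip (t.drop L)
    | none => t
termination_by t.length
decreasing_by have := pvFind_some_ge2 t t.length L h; simp; omega

def solution_alt (s : String) : String := String.mk (pvStrip s.toList)

-- ===== PRECONDITION & SPEC =====
def Spec_solution (s : String) (out : String) : Prop := out = solution_alt s
instance (s : String) (out : String) : Decidable (Spec_solution s out) := by unfold Spec_solution; infer_instance

-- ===== CLAIM (what is proved, stated in full; the proofs are below) =====
def Claim_equal_solution : Prop := ∀ (s : String), Dom_solution s → Spec_solution s (solution s)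

-- ===== LEMMAS AND PROOFS =====

-- A's checker equals the symmetric pairwise condition on cs[l..r] (fuel k bounds r - l)
theorem pvChecker_iff_aux (cs : List Char) (k : Nat) :
    ∀ l r : Nat, r - l ≤ k → r < cs.length →
    (pvChecker cs l r = true ↔ ∀ i : Nat, l ≤ i → i ≤ r → cs[i]? = cs[(l + r - i)]?) := by
  induction k with
  | zero =>
    intro l r hk hr
    rw [pvChecker, if_neg (by omega)]
    simp only [true_iff]
    intro i h1 h2
    have h3 : l + r - i = i := by omega
    rw [h3]
  | succ n ih =>
    intro l r hk hr
    by_cases hlr : l < r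
    · have hl : l < cs.length := by omega
      rw [pvChecker, if_pos (by exact_mod_cast hlr)]
      rw [PySem.List.pyGet?_natCast, PySem.List.pyGet?_natCast,
          List.getElem?_eq_getElem hl, List.getElem?_eq_getElem hr]
      have hcast1 : (l : Int) + 1 = ((l + 1 : Nat) : Int) := by push_cast; ring
      have hcast2 : (r : Int) - 1 = ((r - 1 : Nat) : Int) := by omega
      rw [hcast1, hcast2]
      have hih := ih (l + 1) (r - 1) (by omega) (by omega)
      by_cases heq : cs[l]'hl = cs[r]'hr
      · have hred : (match some (cs[l]'hl), some (cs[r]'hr) with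
            | some a, some b => if a ≠ b then false else pvChecker cs ((l + 1 : Nat) : Int) ((r - 1 : Nat) : Int)
            | _, _ => false) = pvChecker cs ((l + 1 : Nat) : Int) ((r - 1 : Nat) : Int) := by
          simp [heq]
        rw [hred, hih]
        constructor
        · intro h i h1 h2
          by_cases hil : i = l
          · subst hil
            have h3 : i + r - i = r := by omega
            rw [h3, List.getElem?_eq_getElem hl, List.getElem?_eq_getElem hr, heq]
          · by_cases hir : i = r
            · subst hir
              have h3 : l + i - i = l := by omega
              rw [h3, List.getElem?_eq_getElem hr, List.getElem?_eq_getElem hl, heq]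
            · have h4 := h i (by omega) (by omega)
              have harith : l + 1 + (r - 1) - i = l + r - i := by omega
              rw [harith] at h4
              exact h4
        · intro h i h1 h2
          have h4 := h i (by omega) (by omega)
          have harith : l + 1 + (r - 1) - i = l + r - i := by omega
          rw [harith]
          exact h4
      · have hred : (match some (cs[l]'hl), some (cs[r]'hr) with
            | some a, some b => if a ≠ b then false else pvChecker cs ((l + 1 : Nat) : Int) ((r - 1 : Nat) : Int)
            | _, _ => false) = false := by
          simp [heq]
        rw [hred]
        simp only [Bool.false_eq_true, false_iff]
        intro h
        have h4 := h l (le_refl l) (by omega)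
        have harith : l + r - l = r := by omega
        rw [harith, List.getElem?_eq_getElem hl, List.getElem?_eq_getElem hr] at h4
        exact heq (by injection h4)
    · rw [pvChecker, if_neg (by exact_mod_cast hlr)]
      simp only [true_iff]
      intro i h1 h2
      have h3 : l + r - i = i := by omega
      rw [h3]

-- B's reversal test equals the symmetric pairwise condition
theorem pal_iff (t : List Char) :
    (t = t.reverse) ↔ ∀ i : Nat, i < t.length → t[i]? = t[(t.length - 1 - i)]? := by
  constructor
  · intro h i hi
    conv_lhs => rw [h]
    rw [List.getElem?_reverse hi]
  · intro h
    apply List.ext_getElem?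
    intro i
    by_cases hi : i < t.length
    · rw [List.getElem?_reverse hi]
      exact h i hi
    · rw [List.getElem?_eq_none (by omega), List.getElem?_eq_none (by simp; omega)]

-- predicate bridge: checker on cs[l..l+L-1] equals the prefix-reversal test on (cs.drop l).take L
theorem chk_pal (cs : List Char) (l L : Nat) (hL : 1 ≤ L) (h : l + L ≤ cs.length) :
    (pvChecker cs l ((l + L - 1 : Nat) : Int) = true)
      ↔ ((cs.drop l).take L = ((cs.drop l).take L).reverse) := by
  have hlen : ((cs.drop l).take L).length = L := by
    simp [List.length_take, List.length_drop]; omega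
  have hget : ∀ j : Nat, j < L → ((cs.drop l).take L)[j]? = cs[(l + j)]? := by
    intro j hj
    rw [List.getElem?_take_of_lt hj, List.getElem?_drop]
  rw [pvChecker_iff_aux cs (l + L - 1) l (l + L - 1) (by omega) (by omega), pal_iff, hlen]
  constructor
  · intro h1 j hj
    rw [hget j hj, hget (L - 1 - j) (by omega)]
    have h4 := h1 (l + j) (by omega) (by omega)
    have harith : l + (l + L - 1) - (l + j) = l + (L - 1 - j) := by omega
    rw [harith] at h4
    exact h4
  · intro h1 i h1' h2'
    have h4 := h1 (i - l) (by omega)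
    rw [hget (i - l) (by omega), hget (L - 1 - (i - l)) (by omega)] at h4
    have ha1 : l + (i - l) = i := by omega
    have ha2 : l + (L - 1 - (i - l)) = l + (l + L - 1) - i := by omega
    rw [ha1, ha2] at h4
    exact h4

-- a palindromic prefix has equal end characters (discharges B's cheap pre-check)
theorem pal_ends (t : List Char) (L : Nat) (h2 : 2 ≤ L) (hL : L ≤ t.length)
    (hp : t.take L = (t.take L).reverse) : t.getD (L - 1) ' ' = t.getD 0 ' ' := by
  have hlen : (t.take L).length = L := by simp [List.length_take]; omega
  have h := (pal_iff _).mp hp 0 (by omega)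
  rw [hlen] at h
  rw [List.getElem?_take_of_lt (by omega), List.getElem?_take_of_lt (by omega)] at h
  rw [List.getD_eq_getElem?_getD, List.getD_eq_getElem?_getD]
  have h3 : L - 1 - 0 = L - 1 := by omega
  rw [h3] at h
  rw [← h]

-- the two scans find the same cut, up to the index change idx = l + L - 1
theorem scan_find (cs : List Char) (l : Nat) : ∀ L : Nat, l + L ≤ cs.length →
    pvScan cs l ((l : Int) + (L : Int) - 1)
      = (pvFind (cs.drop l) L).map (fun L' => (l : Int) + (L' : Int) - 1) := by
  intro L
  induction L with
  | zero =>
    intro h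
    rw [pvScan, if_neg (by omega), pvFind, if_neg (by omega)]
    rfl
  | succ n ih =>
    intro h
    by_cases h2 : 2 ≤ n + 1
    · have hc : ((l : Int) + ((n+1 : Nat) : Int) - 1) = ((l + (n+1) - 1 : Nat) : Int) := by
        push_cast; omega
      rw [pvScan, if_pos (by push_cast; omega), pvFind, if_pos h2, hc]
      by_cases hp : (cs.drop l).take (n+1) = ((cs.drop l).take (n+1)).reverse
      · rw [if_pos ((chk_pal cs l (n+1) (by omega) h).mpr hp),
            if_pos ⟨pal_ends (cs.drop l) (n+1) h2 (by simp; omega) hp, hp⟩]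
        show some ((l + (n+1) - 1 : Nat) : Int)
          = Option.map (fun L' : Nat => (l : Int) + (L' : Int) - 1) (some (n+1))
        rw [Option.map_some]
        congr 1
        push_cast; omega
      · rw [if_neg (by rw [chk_pal cs l (n+1) (by omega) h]; exact hp),
            if_neg (fun hc => hp hc.2)]
        have hc2 : ((l + (n+1) - 1 : Nat) : Int) - 1 = (l : Int) + (n : Int) - 1 := by
          omega
        have hc3 : n + 1 - 1 = n := by omega
        rw [hc2, hc3, ih (by omega)]
    · have hn : n = 0 := by omega
      subst hn
      rw [pvScan, if_neg (by omega), pvFind, if_neg h2]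
      rfl

-- main correspondence: dfs from l equals stripping the suffix cs.drop l (fuel k bounds n - l)
theorem dfs_strip_aux (cs : List Char) (k : Nat) :
    ∀ l : Nat, cs.length - l ≤ k →
    pvDfs cs l ((cs.length : Int) - 1) = pvStrip (cs.drop l) := by
  induction k with
  | zero =>
    intro l h
    rw [pvDfs, if_neg (by omega), if_pos (by omega),
        List.drop_eq_nil_of_le (by omega), pvStrip, if_pos (by simp)]
  | succ k ih =>
    intro l h
    by_cases h1 : l + 1 = cs.length
    · have hl : l < cs.length := by omega
      have hd : cs.drop l = [cs[l]'hl] := by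
        rw [List.drop_eq_getElem_cons hl, List.drop_eq_nil_of_le (by omega)]
      rw [pvDfs, if_pos (by omega), PySem.List.pyGet?_natCast,
          List.getElem?_eq_getElem hl, hd, pvStrip, if_pos (by norm_num)]
    · by_cases h2 : l + 1 < cs.length
      · have hlen : (cs.drop l).length = cs.length - l := by simp
        have hscan : pvScan cs l ((cs.length : Int) - 1)
            = (pvFind (cs.drop l) (cs.length - l)).map
                (fun L' => (l : Int) + (L' : Int) - 1) := by
          have hc : ((l : Int) + ((cs.length - l : Nat) : Int) - 1) = (cs.length : Int) - 1 := by
            omega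
          rw [← hc]
          exact scan_find cs l (cs.length - l) (by omega)
        rw [pvDfs, if_neg (by omega), if_neg (by omega)]
        split
        · rename_i idx heq
          rw [hscan] at heq
          cases hfind : pvFind (cs.drop l) (cs.length - l) with
          | none => rw [hfind] at heq; exact absurd heq (by simp)
          | some L' =>
            rw [hfind] at heq
            have heq2 : (l : Int) + (L' : Int) - 1 = idx := Option.some.inj heq
            have hL2 := pvFind_some_ge2 _ _ _ hfind
            rw [pvStrip, if_neg (by omega)]
            split
            · rename_i L'' hfind2
              rw [hlen, hfind] at hfind2
              injection hfind2 with hfind2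
              subst hfind2
              have hcast : idx + 1 = ((l + L' : Nat) : Int) := by omega
              rw [hcast, List.drop_drop]
              exact ih (l + L') (by omega)
            · rename_i hfind2
              rw [hlen, hfind] at hfind2
              exact absurd hfind2 (by simp)
        · rename_i heq
          rw [hscan] at heq
          have hfind : pvFind (cs.drop l) (cs.length - l) = none := by
            cases hf : pvFind (cs.drop l) (cs.length - l) with
            | none => rfl
            | some L' => rw [hf] at heq; exact absurd heq (by simp)
          have hc : (cs.length : Int) - 1 + 1 = ((cs.length : Nat) : Int) := by omega
          rw [hc, PySem.List.slice_natCast, pvStrip, if_neg (by omega)]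
          split
          · rename_i L'' hfind2
            rw [hlen, hfind] at hfind2
            exact absurd hfind2 (by simp)
          · exact List.take_of_length_le (by simp)
      · rw [pvDfs, if_neg (by omega), if_pos (by omega),
            List.drop_eq_nil_of_le (by omega), pvStrip, if_pos (by simp)]

-- ===== VERDICT (by name: the statement is the Claim_ definition above) =====
theorem solution_spec : Claim_equal_solution := by
  intro s _
  have h := dfs_strip_aux s.toList s.toList.length 0 (by omega)
  simp only [List.drop_zero, Int.natCast_zero] at h
  unfold Spec_solution solution solution_alt
  exact congrArg String.mk h
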